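-- pv_equiv track=rewrite | github.com/Chrlol/adventOfCode | AdventOfCode/DayFour - 2.py | HasAdjecent
-- ===== SOURCE A (Python) =====
-- def HasAdjecent(x):
--     s = str(x)
--     list = [[s[0], 0]]
--     for c in s:
--         if c == list[-1][0]:
--             list[-1][1] = list[-1][1] + 1
--         else:
--             list.append([c,1])
--     list2 = []
--     for x in list:
--         list2.append(x[1])
--
--     if 2 in list2:
--         return True
--     return False
-- ===== SOURCE B (Python) =====
-- def HasAdjecent(x):
--     # Single sliding-window pass over str(x): a length-2 run starts at i iff
--     # s[i]==s[i+1], the previous char differs and the next char differs.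
--     # No run-length list is built.
--     s = str(x)
--     prev = None
--     for i in range(len(s) - 1):
--         a, b = s[i], s[i + 1]
--         nxt = s[i + 2] if i + 2 < len(s) else None
--         if a == b and prev != a and nxt != b:
--             return True
--         prev = a
--     return False
-- ===== Notes on version B (the rewrite author's own statement) =====
-- stated objective: simpler
-- what changed: B replaces A's run-length-encoding list (built by a fold, then projected to counts and searched for 2) with a single sliding-window scan that returns True as soon as a neighbour pair with differing chars on both sides is found; no intermediate list is maintained and the scan exits early.
import Mathlib
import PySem

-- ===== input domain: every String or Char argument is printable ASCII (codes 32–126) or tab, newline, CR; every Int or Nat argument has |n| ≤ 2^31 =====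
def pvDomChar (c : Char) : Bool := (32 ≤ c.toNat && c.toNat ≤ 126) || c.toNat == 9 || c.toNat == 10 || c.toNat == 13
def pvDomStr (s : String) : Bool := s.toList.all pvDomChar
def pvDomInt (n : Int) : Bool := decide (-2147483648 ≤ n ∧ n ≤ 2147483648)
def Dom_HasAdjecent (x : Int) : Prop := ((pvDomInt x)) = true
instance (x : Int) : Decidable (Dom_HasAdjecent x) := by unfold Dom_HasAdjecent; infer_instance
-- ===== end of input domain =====

-- B replaces A's run-length list by a single sliding-window neighbour scan with early exit (objective: simpler).

-- ===== PORT A =====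
-- A's run list is kept with the LAST run at the head (Python's list[-1] access and
-- append become head access and cons); '2 in list2' is order-independent membership.
def stepA (acc : List (Char × Int)) (c : Char) : List (Char × Int) :=
  match acc with
  | (ch, n) :: rest => if c == ch then (ch, n + 1) :: rest else (c, 1) :: (ch, n) :: rest
  | [] => [(c, 1)]   -- unreachable: the accumulator starts nonempty

def HasAdjecent (x : Int) : Bool :=
  match (PySem.Int.toStr x).toList with
  | [] => false      -- unreachable: str(x) is never empty (A would raise on s[0])
  | c0 :: _ =>
    let l := ((PySem.Int.toStr x).toList).foldl stepA [(c0, 0)]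
    let list2 := l.map (·.2)
    list2.contains 2

-- ===== PORT B =====
-- transliteration of Source B's loop: prev is the char before the current window (None at start),
-- the window is the first two chars of the remaining list, nxt its third char (None at end).
def scanB (prev : Option Char) : List Char → Bool
  | a :: b :: rest =>
    if a == b && prev != some a && rest.head? != some b then true
    else scanB (some a) (b :: rest)
  | _ => false

def HasAdjecent_alt (x : Int) : Bool := scanB none (PySem.Int.toStr x).toList

-- ===== PRECONDITION & SPEC =====
def Spec_HasAdjecent (x : Int) (out : Bool) : Prop := out = HasAdjecent_alt x
instance (x : Int) (out : Bool) : Decidable (Spec_HasAdjecent x out) := by unfold Spec_HasAdjecent; infer_instance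

-- ===== CLAIM (what is proved, stated in full; the proofs are below) =====
def Claim_equal_HasAdjecent : Prop := ∀ (x : Int), Dom_HasAdjecent x → Spec_HasAdjecent x (HasAdjecent x)

-- ===== LEMMAS AND PROOFS =====

-- proof-only tail-recursive restatement of A's fold: current run char c with count k,
-- found = whether a completed run of length exactly 2 was already seen
def procA (c : Char) (k : Int) (found : Bool) : List Char → Bool
  | [] => found || (k == 2)
  | d :: rest => if d == c then procA c (k + 1) found rest else procA d 1 (found || (k == 2)) rest

theorem foldA_eq_procA (cs : List Char) : ∀ (c : Char) (k : Int) (rest : List (Char × Int)),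
    ((List.foldl stepA ((c, k) :: rest) cs).map (·.2)).contains 2
      = procA c k ((rest.map (·.2)).contains 2) cs := by
  induction cs with
  | nil =>
    intro c k rest
    simp only [List.foldl_nil, List.map_cons, List.contains_cons, procA]
    rw [Bool.or_comm]
    congr 1
    rcases eq_or_ne k 2 with h2k | h2k
    · simp [h2k]
    · simp [h2k, Ne.symm h2k]
  | cons d cs ih =>
    intro c k rest
    rw [List.foldl_cons]
    by_cases h : (d == c) = true
    · rw [show stepA ((c, k) :: rest) d = (c, k + 1) :: rest by simp [stepA, h]]
      rw [ih c (k + 1) rest, show procA c k ((rest.map (·.2)).contains 2) (d :: cs)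
            = procA c (k + 1) ((rest.map (·.2)).contains 2) cs by simp [procA, h]]
    · rw [show stepA ((c, k) :: rest) d = (d, 1) :: (c, k) :: rest by simp [stepA, h]]
      rw [ih d 1 ((c, k) :: rest), show procA c k ((rest.map (·.2)).contains 2) (d :: cs)
            = procA d 1 ((rest.map (·.2)).contains 2 || (k == 2)) cs by simp [procA, h]]
      rw [List.map_cons, List.contains_cons]
      congr 1
      rw [Bool.or_comm]
      congr 1
      rcases eq_or_ne k 2 with h2k | h2k
      · simp [h2k]
      · simp [h2k, Ne.symm h2k]

theorem scanB_irrel (l : List Char) (c d : Char) (h : c ≠ d) :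
    scanB (some c) (d :: l) = scanB none (d :: l) := by
  cases l with
  | nil => rfl
  | cons b r =>
    simp only [scanB]
    have h1 : (some c != some d) = true := by simp [h]
    have h2 : ((none : Option Char) != some d) = true := by simp
    rw [h1, h2]

-- B's scan state corresponding to A's state (c, k, cs): the last min(k,2) chars of the
-- current run are still in front of the window, prev = c iff the run extends further back
def Rsc (c : Char) (k : Int) (cs : List Char) : Bool :=
  if k == 1 then scanB none (c :: cs)
  else if k == 2 then scanB none (c :: c :: cs)
  else scanB (some c) (c :: c :: cs)

theorem procA_eq_Rsc (cs : List Char) : ∀ (c : Char) (k : Int) (found : Bool), 1 ≤ k →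
    procA c k found cs = (found || Rsc c k cs) := by
  induction cs with
  | nil =>
    intro c k found hk
    rcases eq_or_ne k 1 with h1 | h1
    · subst h1; simp [procA, Rsc, scanB]
    · rcases eq_or_ne k 2 with h2 | h2
      · subst h2; simp [procA, Rsc, scanB]
      · simp [procA, Rsc, scanB, h1, h2]
  | cons d cs ih =>
    intro c k found hk
    by_cases hdc : (d == c) = true
    · have hc : d = c := by simpa using hdc
      subst hc
      rw [show procA d k found (d :: cs) = procA d (k + 1) found cs by simp [procA]]
      rw [ih d (k + 1) found (by omega)]
      congr 1
      -- Rsc d (k + 1) cs = Rsc d k (d :: cs)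
      rcases eq_or_ne k 1 with h1 | h1
      · subst h1; simp [Rsc]
      · rcases eq_or_ne k 2 with h2 | h2
        · subst h2; simp [Rsc, scanB]
        · have h1' : k + 1 ≠ 1 := by omega
          have h2' : k + 1 ≠ 2 := by omega
          simp only [Rsc, h1, h2, h1', h2', if_false, beq_iff_eq]
          simp [scanB]
    · have hdc' : d ≠ c := by simpa using hdc
      rw [show procA c k found (d :: cs) = procA d 1 (found || (k == 2)) cs by simp [procA, hdc]]
      rw [ih d 1 (found || (k == 2)) (by omega)]
      have hRd : Rsc d 1 cs = scanB none (d :: cs) := by simp [Rsc]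
      have hscan : scanB (some c) (d :: cs) = scanB none (d :: cs) :=
        scanB_irrel cs c d (Ne.symm hdc')
      have hkey : Rsc c k (d :: cs) = ((k == 2) || scanB none (d :: cs)) := by
        rcases eq_or_ne k 1 with h1 | h1
        · subst h1
          simp only [Rsc, if_pos (by decide : ((1 : Int) == 1) = true)]
          rw [show scanB none (c :: d :: cs) = scanB (some c) (d :: cs) by
                simp [scanB, Ne.symm hdc']]
          rw [hscan]; simp
        · rcases eq_or_ne k 2 with h2 | h2
          · subst h2
            simp only [Rsc, beq_iff_eq, if_neg h1]
            rw [show scanB none (c :: c :: d :: cs) = true by simp [scanB, hdc']]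
            simp
          · simp only [Rsc, beq_iff_eq, if_neg h1, if_neg h2]
            rw [show scanB (some c) (c :: c :: d :: cs) = scanB (some c) (c :: d :: cs) by
                  simp [scanB]]
            rw [show scanB (some c) (c :: d :: cs) = scanB (some c) (d :: cs) by
                  simp [scanB]]
            rw [hscan]
            simp [h2]
      rw [hkey, hRd, Bool.or_assoc]

-- ===== VERDICT (by name: the statement is the Claim_ definition above) =====
theorem HasAdjecent_spec : Claim_equal_HasAdjecent := by
  intro x _
  unfold Spec_HasAdjecent HasAdjecent HasAdjecent_alt
  cases hs : (PySem.Int.toStr x).toList with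
  | nil => simp [scanB]
  | cons c0 rest =>
    dsimp only
    rw [List.foldl_cons, show stepA [(c0, 0)] c0 = [(c0, 1)] by simp [stepA]]
    rw [show ([(c0, 1)] : List (Char × Int)) = (c0, 1) :: [] from rfl]
    rw [foldA_eq_procA rest c0 1 []]
    rw [show ((([] : List (Char × Int)).map (·.2)).contains 2) = false from rfl]
    rw [procA_eq_Rsc rest c0 1 false (by omega)]
    simp [Rsc]
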